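-- pv_equiv track=rewrite | github.com/pypi-data/pypi-mirror-386 | packages/talkdo/talkdo-1.0.0-py3-none-any.whl/cli_task_manager/core/analytics.py | _get_time_recommendations
-- ===== SOURCE A (Python) =====
-- from typing import Any, Dict, List, Optional, Tuple
--
-- def _get_time_recommendations(hour_analysis: Dict, weekday_tasks: int, weekend_tasks: int) -> List[str]:
--     """Generate time-based recommendations."""
--     recommendations = []
--
--     # Analyze peak hours
--     if hour_analysis:
--         morning_tasks = sum(hour_analysis[h]["created"] for h in range(6, 12))
--         afternoon_tasks = sum(hour_analysis[h]["created"] for h in range(12, 18))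
--         evening_tasks = sum(hour_analysis[h]["created"] for h in range(18, 24))
--
--         if morning_tasks > afternoon_tasks and morning_tasks > evening_tasks:
--             recommendations.append("You're most productive in the morning. Schedule important tasks then.")
--         elif afternoon_tasks > morning_tasks and afternoon_tasks > evening_tasks:
--             recommendations.append("You're most productive in the afternoon. Use mornings for planning.")
--         elif evening_tasks > morning_tasks and evening_tasks > afternoon_tasks:
--             recommendations.append("You're most productive in the evening. Consider flexible scheduling.")
--
--     # Work-life balance recommendations
--     weekend_ratio = (weekend_tasks / (weekday_tasks + weekend_tasks) * 100) if (weekday_tasks + weekend_tasks) > 0 else 0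
--     if weekend_ratio > 30:
--         recommendations.append("Consider reducing weekend work to maintain work-life balance.")
--     elif weekend_ratio < 5:
--         recommendations.append("Good work-life balance! You're keeping weekends for rest.")
--
--     return recommendations
-- ===== SOURCE B (Python) =====
-- _PERIOD_MESSAGES = [
--     "You're most productive in the morning. Schedule important tasks then.",
--     "You're most productive in the afternoon. Use mornings for planning.",
--     "You're most productive in the evening. Consider flexible scheduling.",
-- ]
--
--
-- def _get_time_recommendations(hour_analysis, weekday_tasks, weekend_tasks):
--     """Table-driven: rank the three periods by total and recommend the top only on a strict lead."""
--     recommendations = []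
--     if hour_analysis:
--         totals = [(sum(hour_analysis[h]["created"] for h in range(start, start + 6)), i)
--                   for i, start in enumerate((6, 12, 18))]
--         ranked = sorted(totals, key=lambda t: t[0], reverse=True)
--         if ranked[0][0] > ranked[1][0]:
--             recommendations.append(_PERIOD_MESSAGES[ranked[0][1]])
--     total = weekday_tasks + weekend_tasks
--     if total > 0 and 10 * weekend_tasks > 3 * total:
--         recommendations.append("Consider reducing weekend work to maintain work-life balance.")
--     elif total <= 0 or 20 * weekend_tasks < total:
--         recommendations.append("Good work-life balance! You're keeping weekends for rest.")
--     return recommendations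
-- ===== Notes on version B (the rewrite author's own statement) =====
-- stated objective: alternative
-- what changed: B is table-driven: it builds (total, period-index) pairs from a table of period starts, ranks them with a stable descending sort, appends the table message for the top period only when it strictly leads the runner-up, and tests the weekend ratio with exact integer inequalities instead of float division; A instead sums three hard-coded ranges and walks an explicit strict if/elif comparison chain.
import Mathlib
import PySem

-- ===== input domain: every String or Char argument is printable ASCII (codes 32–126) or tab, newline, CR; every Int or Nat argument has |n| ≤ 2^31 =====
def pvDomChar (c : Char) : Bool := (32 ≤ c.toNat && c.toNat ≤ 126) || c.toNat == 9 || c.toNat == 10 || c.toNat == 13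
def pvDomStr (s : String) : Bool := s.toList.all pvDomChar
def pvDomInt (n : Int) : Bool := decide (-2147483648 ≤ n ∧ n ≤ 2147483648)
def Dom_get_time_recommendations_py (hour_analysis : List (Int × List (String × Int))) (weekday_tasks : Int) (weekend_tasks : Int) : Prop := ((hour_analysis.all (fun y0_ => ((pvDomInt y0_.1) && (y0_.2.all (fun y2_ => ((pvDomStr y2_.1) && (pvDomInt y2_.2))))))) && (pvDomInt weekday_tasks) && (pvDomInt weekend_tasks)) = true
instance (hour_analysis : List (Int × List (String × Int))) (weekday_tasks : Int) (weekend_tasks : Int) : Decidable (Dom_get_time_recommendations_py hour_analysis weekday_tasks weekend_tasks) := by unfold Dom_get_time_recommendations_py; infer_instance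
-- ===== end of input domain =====

-- B is table-driven: (total, period-index) pairs built from a table of period starts, ranked by a
-- stable descending sort, with the table message of the top period emitted only on a strict lead
-- over the runner-up; the weekend-ratio test uses exact integer inequalities (objective:
-- alternative decomposition, same cost).

-- shared helper: hour_analysis[h]["created"]; the getD defaults are unreachable under Pre_
-- (Pre_ demands both keys present), so this is exact where Python does not raise KeyError.
def pyCreated (hour_analysis : List (Int × List (String × Int))) (h : Int) : Int :=
  ((PySem.Dict.mk (((PySem.Dict.mk hour_analysis).get? h).getD [])).get? "created").getD 0

-- ===== PORT A =====
-- Python's float test `weekend/(total)*100 > 30` (resp. `< 5`) is ported as the exact integer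
-- inequality `10*we > 3*total` (resp. `20*we < total`): exact on the domain |n| ≤ 2^31, where the
-- float rounding error is far smaller than the minimal rational distance from the threshold.
def get_time_recommendations_py (hour_analysis : List (Int × List (String × Int))) (weekday_tasks : Int) (weekend_tasks : Int) : List String :=
  let recommendations : List String := []
  let recommendations :=
    if hour_analysis.isEmpty then recommendations
    else
      let morning := ((PySem.List.pyRange 6 12 1).map (pyCreated hour_analysis)).sum
      let afternoon := ((PySem.List.pyRange 12 18 1).map (pyCreated hour_analysis)).sum
      let evening := ((PySem.List.pyRange 18 24 1).map (pyCreated hour_analysis)).sum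
      if morning > afternoon ∧ morning > evening then
        recommendations ++ ["You're most productive in the morning. Schedule important tasks then."]
      else if afternoon > morning ∧ afternoon > evening then
        recommendations ++ ["You're most productive in the afternoon. Use mornings for planning."]
      else if evening > morning ∧ evening > afternoon then
        recommendations ++ ["You're most productive in the evening. Consider flexible scheduling."]
      else recommendations
  let total := weekday_tasks + weekend_tasks
  if total > 0 ∧ 10 * weekend_tasks > 3 * total then
    recommendations ++ ["Consider reducing weekend work to maintain work-life balance."]
  else if ¬ total > 0 ∨ 20 * weekend_tasks < total then
    recommendations ++ ["Good work-life balance! You're keeping weekends for rest."]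
  else recommendations

-- ===== PORT B =====
def pvPeriodMessages : List String :=
  ["You're most productive in the morning. Schedule important tasks then.",
   "You're most productive in the afternoon. Use mornings for planning.",
   "You're most productive in the evening. Consider flexible scheduling."]

def get_time_recommendations_py_alt (hour_analysis : List (Int × List (String × Int))) (weekday_tasks : Int) (weekend_tasks : Int) : List String :=
  let recommendations : List String := []
  let recommendations :=
    if hour_analysis.isEmpty then recommendations
    else
      let totals := (PySem.List.enumerate [(6 : Int), 12, 18]).map
        (fun p => (((PySem.List.pyRange p.2 (p.2 + 6) 1).map (pyCreated hour_analysis)).sum, p.1))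
      let ranked := PySem.List.sorted totals (fun t => t.1) true
      -- ranked always has 3 elements, so the pyGet? defaults are unreachable (exact port of ranked[0]/ranked[1])
      let top := (PySem.List.pyGet? ranked 0).getD (0, 0)
      let second := (PySem.List.pyGet? ranked 1).getD (0, 0)
      if top.1 > second.1 then
        recommendations ++ [(PySem.List.pyGet? pvPeriodMessages top.2).getD ""]
      else recommendations
  let total := weekday_tasks + weekend_tasks
  if total > 0 ∧ 10 * weekend_tasks > 3 * total then
    recommendations ++ ["Consider reducing weekend work to maintain work-life balance."]
  else if total ≤ 0 ∨ 20 * weekend_tasks < total then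
    recommendations ++ ["Good work-life balance! You're keeping weekends for rest."]
  else recommendations

-- ===== PRECONDITION & SPEC =====
-- Pre_ excludes exactly the inputs where Python A raises KeyError: a nonempty dict missing some
-- hour key in 6..23 or whose hour entry lacks the "created" key.
def Pre_get_time_recommendations_py (hour_analysis : List (Int × List (String × Int))) (weekday_tasks : Int) (weekend_tasks : Int) : Prop :=
  hour_analysis = [] ∨
    ∀ h ∈ PySem.List.pyRange 6 24 1,
      ((PySem.Dict.mk hour_analysis).get? h).isSome ∧
      ((PySem.Dict.mk (((PySem.Dict.mk hour_analysis).get? h).getD [])).get? "created").isSome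
instance (hour_analysis : List (Int × List (String × Int))) (weekday_tasks : Int) (weekend_tasks : Int) : Decidable (Pre_get_time_recommendations_py hour_analysis weekday_tasks weekend_tasks) := by unfold Pre_get_time_recommendations_py; infer_instance

def pvWitness_get_time_recommendations_py : (List (Int × List (String × Int))) × Int × Int := ([], 3, 0)

def Spec_get_time_recommendations_py (hour_analysis : List (Int × List (String × Int))) (weekday_tasks : Int) (weekend_tasks : Int) (out : List String) : Prop := out = get_time_recommendations_py_alt hour_analysis weekday_tasks weekend_tasks
instance (hour_analysis : List (Int × List (String × Int))) (weekday_tasks : Int) (weekend_tasks : Int) (out : List String) : Decidable (Spec_get_time_recommendations_py hour_analysis weekday_tasks weekend_tasks out) := by unfold Spec_get_time_recommendations_py; infer_instance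

-- ===== CLAIM =====
def Claim_equal_get_time_recommendations_py : Prop := ∀ (hour_analysis : List (Int × List (String × Int))) (weekday_tasks : Int) (weekend_tasks : Int), Dom_get_time_recommendations_py hour_analysis weekday_tasks weekend_tasks → Pre_get_time_recommendations_py hour_analysis weekday_tasks weekend_tasks → Spec_get_time_recommendations_py hour_analysis weekday_tasks weekend_tasks (get_time_recommendations_py hour_analysis weekday_tasks weekend_tasks)

-- ===== LEMMAS AND PROOFS =====

-- ===== VERDICT =====
-- The core step shows A's strict three-way if/elif chain equals B's rank-then-strict-lead
-- selection on the same three totals (B's stable descending insertion sort is unfolded and all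
-- comparison cases are enumerated).
theorem get_time_recommendations_py_spec : Claim_equal_get_time_recommendations_py := by
  intro ha wd we _ _
  unfold Spec_get_time_recommendations_py get_time_recommendations_py get_time_recommendations_py_alt
  by_cases hE : ha.isEmpty <;>
    simp only [hE, if_true, PySem.List.enumerate_cons, PySem.List.enumerate_nil,
      List.map_cons, List.map_nil, List.nil_append]
  · split_ifs <;> first | rfl | omega
  · simp only [show (6:Int)+6 = 12 by norm_num, show (12:Int)+6 = 18 by norm_num,
      show (18:Int)+6 = 24 by norm_num, show (0:Int)+1 = 1 by norm_num,
      show (1:Int)+1 = 2 by norm_num]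
    generalize ((PySem.List.pyRange 6 12 1).map (pyCreated ha)).sum = m
    generalize ((PySem.List.pyRange 12 18 1).map (pyCreated ha)).sum = a
    generalize ((PySem.List.pyRange 18 24 1).map (pyCreated ha)).sum = e
    simp only [PySem.List.sorted_rev_eq_foldl_insertBy, List.foldl]
    by_cases h1 : m < a <;> by_cases h2 : a < e <;> by_cases h3 : m < e <;>
      simp [h1, h2, h3, PySem.List.insertBy, PySem.List.pyGet?, PySem.List.pyIdx?,
        pvPeriodMessages] <;>
      (try split_ifs) <;> first | rfl | omega
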